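-- pv_equiv track=rewrite | github.com/cheonsol-lee/coding_test | 백준/2138(전구와 스위치).py | push_button
-- ===== SOURCE A (Python) =====
-- def push_button(arr1 ,arr2 , N):
--     count = 0  # 스위치 누른 횟수
--
--     for i in range(1, N):
--         if arr1[i - 1] == arr2[i - 1]:
--             continue
--         else:
--             arr1[i - 1] = 1 - arr1[i - 1]
--             arr1[i] = 1 - arr1[i]
--
--             # 맨 끝항 아닐때
--             if i != N - 1:
--                 arr1[i + 1] = 1 - arr1[i + 1]
--
--             count += 1
--
--     # 답을 찾을경우
--     if arr1 == arr2:
--         return count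
--     else:
--         return -1
-- ===== SOURCE B (Python) =====
-- def push_button(arr1, arr2, N):
--     # One-pass carry-flag scan: decide each press from the initial values and two
--     # pending-flip flags, build the final bulb list front-to-back, then write it
--     # back into arr1 (same in-place mutation as the original).
--     count = 0
--     f0 = False  # pending flip on the position currently examined
--     f1 = False  # pending flip on the position after it
--     out = []
--     for t in range(max(N - 1, 0)):
--         v = arr1[t]
--         if f0:
--             v = 1 - v
--         p = v != arr2[t]
--         if p:
--             count += 1
--             v = 1 - v
--         out.append(v)
--         f0, f1 = f1 != p, p and (t + 1 != N - 1)
--     if N >= 2: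
--         v = arr1[N - 1]
--         if f0:
--             v = 1 - v
--         out.append(v)
--     out.extend(arr1[len(out):])
--     arr1[:] = out
--     return count if arr1 == arr2 else -1
-- ===== Notes on version B (the rewrite author's own statement) =====
-- stated objective: alternative
-- what changed: Instead of repeatedly toggling three cells of arr1 in place and re-reading the mutated list, B does a single forward scan over the initial values with two O(1) pending-flip carry flags, building the final bulb list front-to-back and writing it into arr1 once.
-- outside the precondition, e.g. on push_button([0], [0], 2): A returns 0, B raises IndexError
import Mathlib
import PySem

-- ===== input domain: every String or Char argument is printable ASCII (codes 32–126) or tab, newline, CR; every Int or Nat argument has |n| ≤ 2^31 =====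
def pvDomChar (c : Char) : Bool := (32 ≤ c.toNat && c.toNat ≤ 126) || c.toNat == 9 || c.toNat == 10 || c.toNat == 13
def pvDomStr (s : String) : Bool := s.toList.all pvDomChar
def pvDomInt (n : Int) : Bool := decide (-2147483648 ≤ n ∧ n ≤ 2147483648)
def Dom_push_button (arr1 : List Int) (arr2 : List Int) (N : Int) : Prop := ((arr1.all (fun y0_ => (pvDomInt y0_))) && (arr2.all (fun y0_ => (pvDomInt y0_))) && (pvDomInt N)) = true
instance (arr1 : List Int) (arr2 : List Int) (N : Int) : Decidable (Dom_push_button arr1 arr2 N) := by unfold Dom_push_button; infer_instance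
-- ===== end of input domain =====

-- B replaces A's in-place triple-toggle loop by a single forward scan over the initial
-- values with two pending-flip carry flags, building the final list front-to-back
-- (objective: alternative).  Both mutate arr1 in Python; the equivalence proved here is
-- about the RETURN value, with B's final arr1 contents shown equal to A's via the ports.

-- ===== PORT A =====
-- arr1[k] = 1 - arr1[k]; index accesses are via getD 0, exact on Pre_ (all indices in range).
def pvTogA (a : List Int) (k : Nat) : List Int := a.set k (1 - a.getD k 0)

def pvStepA (arr2 : List Int) (N : Int) (st : List Int × Int) (i : Nat) : List Int × Int :=
  if st.1.getD (i - 1) 0 = arr2.getD (i - 1) 0 then st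
  else
    let a1 := pvTogA st.1 (i - 1)
    let a2 := pvTogA a1 i
    let a3 := if (i : Int) ≠ N - 1 then pvTogA a2 (i + 1) else a2
    (a3, st.2 + 1)

def push_button (arr1 : List Int) (arr2 : List Int) (N : Int) : Int :=
  let st := (List.range' 1 (N - 1).toNat).foldl (pvStepA arr2 N) (arr1, 0)
  if st.1 = arr2 then st.2 else -1

-- ===== PORT B =====
-- state: (count, f0, f1, out)
def pvStepB (arr1 : List Int) (arr2 : List Int) (N : Int)
    (st : Int × Bool × Bool × List Int) (t : Nat) : Int × Bool × Bool × List Int :=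
  let v0 := arr1.getD t 0
  let v1 := if st.2.1 then 1 - v0 else v0
  let p : Bool := decide (v1 ≠ arr2.getD t 0)
  let v2 := if p then 1 - v1 else v1
  (st.1 + (if p then 1 else 0), xor st.2.2.1 p, p && decide (((t : Int) + 1) ≠ N - 1),
   st.2.2.2 ++ [v2])

def push_button_alt (arr1 : List Int) (arr2 : List Int) (N : Int) : Int :=
  let st := (List.range (N - 1).toNat).foldl (pvStepB arr1 arr2 N) (0, false, false, [])
  let out1 := if 2 ≤ N then
                st.2.2.2 ++ [if st.2.1 then 1 - arr1.getD (N - 1).toNat 0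
                             else arr1.getD (N - 1).toNat 0]
              else st.2.2.2
  let out := out1 ++ arr1.drop out1.length
  if out = arr2 then st.1 else -1

-- ===== PRECONDITION & SPEC =====
-- Pre_ excludes inputs on which the loop's index arithmetic reaches past the end of
-- arr1/arr2 (IndexError in A in the general case); this also excludes data-dependent
-- corners such as ([0],[0],2), where A happens to return because every compared position
-- is already equal while B raises IndexError reading the last bulb.
def Pre_push_button (arr1 : List Int) (arr2 : List Int) (N : Int) : Prop :=
  N ≤ 1 ∨ (N ≤ (arr1.length : Int) ∧ N - 1 ≤ (arr2.length : Int))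

instance (arr1 : List Int) (arr2 : List Int) (N : Int) : Decidable (Pre_push_button arr1 arr2 N) := by
  unfold Pre_push_button; infer_instance

def pvWitness_push_button : List Int × List Int × Int := ([1, 0, 0], [0, 0, 0], 3)

def Spec_push_button (arr1 : List Int) (arr2 : List Int) (N : Int) (out : Int) : Prop :=
  out = push_button_alt arr1 arr2 N

instance (arr1 : List Int) (arr2 : List Int) (N : Int) (out : Int) : Decidable (Spec_push_button arr1 arr2 N out) := by
  unfold Spec_push_button; infer_instance

-- ===== CLAIM (what is proved, stated in full; the proofs are below) =====
def Claim_equal_push_button : Prop := ∀ (arr1 : List Int) (arr2 : List Int) (N : Int), Dom_push_button arr1 arr2 N → Pre_push_button arr1 arr2 N → Spec_push_button arr1 arr2 N (push_button arr1 arr2 N)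

-- ===== LEMMAS AND PROOFS =====

-- the two pending carry flips applied to the first (and second) remaining position
def pvCarry (f0 f1 : Bool) : List Int → List Int
  | [] => []
  | x :: rest =>
      (if f0 then 1 - x else x) ::
        (match rest with
         | [] => []
         | y :: r => (if f1 then 1 - y else y) :: r)

lemma pvCarry_false_false (l : List Int) : pvCarry false false l = l := by
  cases l with
  | nil => rfl
  | cons x rest => cases rest <;> simp [pvCarry]

lemma getD_append_len (out l : List Int) (j : Nat) :
    (out ++ l).getD (out.length + j) 0 = l.getD j 0 := by
  simp [List.getD, List.getElem?_append_right (Nat.le_add_right _ _)]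

lemma pvTogA_append (out l : List Int) (j : Nat) :
    pvTogA (out ++ l) (out.length + j) = out ++ pvTogA l j := by
  simp only [pvTogA, List.set_append, Nat.add_sub_cancel_left, getD_append_len]
  simp

-- main loop invariant: after k steps, A's state is B's emitted prefix plus the
-- carry flags applied to the untouched suffix; counts agree; at the very last
-- step f1 has been forced to false by the boundary test.
lemma pvCarry_cons_cons (f0 f1 : Bool) (x y : Int) (r : List Int) :
    pvCarry f0 f1 (x :: y :: r) =
      (if f0 then 1 - x else x) :: (if f1 then 1 - y else y) :: r := rfl

lemma pvCarry_snd_false (f : Bool) (x : Int) (r : List Int) :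
    pvCarry f false (x :: r) = (if f then 1 - x else x) :: r := by
  cases r <;> simp [pvCarry]

lemma pvTogA_cons_zero (x : Int) (r : List Int) : pvTogA (x :: r) 0 = (1 - x) :: r := by
  simp [pvTogA, List.getD]

lemma pvTogA_cons_succ (x : Int) (r : List Int) (j : Nat) :
    pvTogA (x :: r) (j + 1) = x :: pvTogA r j := by
  simp [pvTogA, List.getD]

lemma pv_drop_cons (l : List Int) (m : Nat) (h : m < l.length) :
    l.drop m = l.getD m 0 :: l.drop (m + 1) := by
  rw [List.drop_eq_getElem_cons h, List.getD_eq_getElem l 0 h]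

lemma pv_loop_inv (arr1 arr2 : List Int) (N : Int)
    (hN : 2 ≤ N) (h1 : N ≤ (arr1.length : Int)) :
    ∀ k : Nat, k ≤ (N - 1).toNat →
      (let sa := (List.range' 1 k).foldl (pvStepA arr2 N) (arr1, 0)
       let sb := (List.range k).foldl (pvStepB arr1 arr2 N) (0, false, false, [])
       sa.2 = sb.1 ∧ sb.2.2.2.length = k ∧
       sa.1 = sb.2.2.2 ++ pvCarry sb.2.1 sb.2.2.1 (arr1.drop k) ∧
       (k = (N - 1).toNat → sb.2.2.1 = false)) := by
  intro k
  induction k with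
  | zero =>
    intro _
    refine ⟨rfl, rfl, by simp [pvCarry_false_false], fun h => absurd h (by omega)⟩
  | succ k ih =>
    intro hk1
    obtain ⟨hc, hlen, ha, -⟩ := ih (Nat.le_of_succ_le hk1)
    rcases hsb : (List.range k).foldl (pvStepB arr1 arr2 N) (0, false, false, []) with
      ⟨c, f0, f1, out⟩
    rw [hsb] at hc hlen ha
    dsimp only at hc hlen ha
    have hsa : (List.range' 1 k).foldl (pvStepA arr2 N) (arr1, 0) =
        (out ++ pvCarry f0 f1 (arr1.drop k), c) := by
      rw [Prod.ext_iff]; exact ⟨ha, hc⟩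
    have hklen : k + 2 ≤ arr1.length := by omega
    have hd : arr1.drop k = arr1.getD k 0 :: arr1.getD (k + 1) 0 :: arr1.drop (k + 2) := by
      rw [pv_drop_cons arr1 k (by omega), pv_drop_cons arr1 (k + 1) (by omega)]
    have hcar : pvCarry f0 f1 (arr1.drop k) =
        (if f0 = true then 1 - arr1.getD k 0 else arr1.getD k 0) ::
        (if f1 = true then 1 - arr1.getD (k + 1) 0 else arr1.getD (k + 1) 0) ::
        arr1.drop (k + 2) := by
      rw [hd, pvCarry_cons_cons]
    have hread : (out ++ pvCarry f0 f1 (arr1.drop k)).getD k 0 =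
        (if f0 = true then 1 - arr1.getD k 0 else arr1.getD k 0) := by
      rw [hcar, show k = out.length + 0 from by omega, getD_append_len]
      simp [List.getD]
    rw [List.range'_concat, List.range_succ, List.foldl_append, List.foldl_append, hsa, hsb]
    simp only [List.foldl_cons, List.foldl_nil]
    rw [show 1 + 1 * k = k + 1 by omega]
    by_cases hp : (if f0 = true then 1 - arr1.getD k 0 else arr1.getD k 0) = arr2.getD k 0
    · -- equal position: no press
      have hA : pvStepA arr2 N (out ++ pvCarry f0 f1 (arr1.drop k), c) (k + 1) =
          (out ++ pvCarry f0 f1 (arr1.drop k), c) := by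
        simp only [pvStepA, Nat.add_sub_cancel, hread]
        rw [if_pos hp]
      have hpd : decide ((if f0 = true then 1 - arr1.getD k 0 else arr1.getD k 0) ≠
          arr2.getD k 0) = false := decide_eq_false (fun h => h hp)
      have hB : pvStepB arr1 arr2 N (c, f0, f1, out) k =
          (c, f1, false, out ++ [if f0 = true then 1 - arr1.getD k 0 else arr1.getD k 0]) := by
        simp only [pvStepB, hpd]
        simp
      rw [hA, hB]
      refine ⟨rfl, by simp [hlen], ?_, fun _ => rfl⟩
      dsimp only
      rw [hcar, pv_drop_cons arr1 (k + 1) (by omega), pvCarry_snd_false]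
      simp
    · -- press at i = k + 1
      have hpd : decide ((if f0 = true then 1 - arr1.getD k 0 else arr1.getD k 0) ≠
          arr2.getD k 0) = true := decide_eq_true hp
      have hB : pvStepB arr1 arr2 N (c, f0, f1, out) k =
          (c + 1, !f1, decide (((k : Int) + 1) ≠ N - 1),
           out ++ [1 - (if f0 = true then 1 - arr1.getD k 0 else arr1.getD k 0)]) := by
        simp only [pvStepB, hpd]
        simp
      have hflip : 1 - (if f1 = true then 1 - arr1.getD (k + 1) 0 else arr1.getD (k + 1) 0) =
          (if (!f1) = true then 1 - arr1.getD (k + 1) 0 else arr1.getD (k + 1) 0) := by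
        cases f1 <;> simp [sub_sub_cancel]
      have hA1 : pvTogA (out ++ pvCarry f0 f1 (arr1.drop k)) k =
          out ++ ((1 - (if f0 = true then 1 - arr1.getD k 0 else arr1.getD k 0)) ::
            (if f1 = true then 1 - arr1.getD (k + 1) 0 else arr1.getD (k + 1) 0) ::
            arr1.drop (k + 2)) := by
        have h := pvTogA_append out (pvCarry f0 f1 (arr1.drop k)) 0
        rw [Nat.add_zero, hlen] at h
        rw [h, hcar, pvTogA_cons_zero]
      have hA2 : pvTogA (out ++ ((1 - (if f0 = true then 1 - arr1.getD k 0 else arr1.getD k 0)) ::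
            (if f1 = true then 1 - arr1.getD (k + 1) 0 else arr1.getD (k + 1) 0) ::
            arr1.drop (k + 2))) (k + 1) =
          out ++ ((1 - (if f0 = true then 1 - arr1.getD k 0 else arr1.getD k 0)) ::
            (if (!f1) = true then 1 - arr1.getD (k + 1) 0 else arr1.getD (k + 1) 0) ::
            arr1.drop (k + 2)) := by
        have h := pvTogA_append out ((1 - (if f0 = true then 1 - arr1.getD k 0 else arr1.getD k 0)) ::
          (if f1 = true then 1 - arr1.getD (k + 1) 0 else arr1.getD (k + 1) 0) ::
          arr1.drop (k + 2)) 1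
        rw [hlen] at h
        rw [h, pvTogA_cons_succ, pvTogA_cons_zero, hflip]
      by_cases hcond : (((k + 1 : Nat) : Int)) ≠ N - 1
      · -- not the last switch: third toggle happens
        have hcond' : ((k : Int) + 1 ≠ N - 1) := by push_cast at hcond; exact hcond
        have hk2 : k + 2 < arr1.length := by omega
        have hd2 : arr1.drop (k + 2) = arr1.getD (k + 2) 0 :: arr1.drop (k + 3) :=
          pv_drop_cons arr1 (k + 2) hk2
        have hA3 : pvTogA (out ++ ((1 - (if f0 = true then 1 - arr1.getD k 0 else arr1.getD k 0)) ::
              (if (!f1) = true then 1 - arr1.getD (k + 1) 0 else arr1.getD (k + 1) 0) ::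
              arr1.drop (k + 2))) (k + 1 + 1) =
            out ++ ((1 - (if f0 = true then 1 - arr1.getD k 0 else arr1.getD k 0)) ::
              (if (!f1) = true then 1 - arr1.getD (k + 1) 0 else arr1.getD (k + 1) 0) ::
              (1 - arr1.getD (k + 2) 0) :: arr1.drop (k + 3)) := by
          have h := pvTogA_append out ((1 - (if f0 = true then 1 - arr1.getD k 0 else arr1.getD k 0)) ::
            (if (!f1) = true then 1 - arr1.getD (k + 1) 0 else arr1.getD (k + 1) 0) ::
            arr1.drop (k + 2)) 2
          rw [hlen] at h
          rw [show k + 1 + 1 = k + 2 from rfl, h, pvTogA_cons_succ, pvTogA_cons_succ,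
            hd2, pvTogA_cons_zero]
        have hAstep : pvStepA arr2 N (out ++ pvCarry f0 f1 (arr1.drop k), c) (k + 1) =
            (out ++ ((1 - (if f0 = true then 1 - arr1.getD k 0 else arr1.getD k 0)) ::
              (if (!f1) = true then 1 - arr1.getD (k + 1) 0 else arr1.getD (k + 1) 0) ::
              (1 - arr1.getD (k + 2) 0) :: arr1.drop (k + 3)), c + 1) := by
          simp only [pvStepA, Nat.add_sub_cancel, hread]
          rw [if_neg hp, if_pos hcond, hA1, hA2, hA3]
        rw [hAstep, hB]
        refine ⟨rfl, by simp [hlen], ?_, ?_⟩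
        · dsimp only
          rw [pv_drop_cons arr1 (k + 1) (by omega),
            show k + 1 + 1 = k + 2 from rfl, hd2,
            show decide (((k : Int) + 1) ≠ N - 1) = true from by
              simpa using hcond',
            pvCarry_cons_cons]
          simp
        · intro hlast
          exact absurd (by push_cast; omega : (((k + 1 : Nat) : Int)) = N - 1) hcond
      · -- last switch: i = N - 1, no third toggle
        rw [not_not] at hcond
        have hAstep : pvStepA arr2 N (out ++ pvCarry f0 f1 (arr1.drop k), c) (k + 1) =
            (out ++ ((1 - (if f0 = true then 1 - arr1.getD k 0 else arr1.getD k 0)) ::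
              (if (!f1) = true then 1 - arr1.getD (k + 1) 0 else arr1.getD (k + 1) 0) ::
              arr1.drop (k + 2)), c + 1) := by
          simp only [pvStepA, Nat.add_sub_cancel, hread]
          rw [if_neg hp, if_neg (by simpa using hcond), hA1, hA2]
        rw [hAstep, hB]
        have hf1' : decide (((k : Int) + 1) ≠ N - 1) = false := by
          simp only [decide_eq_false_iff_not, ne_eq, not_not]
          push_cast at hcond ⊢; omega
        refine ⟨rfl, by simp [hlen], ?_, fun _ => hf1'⟩
        dsimp only
        rw [hf1', pv_drop_cons arr1 (k + 1) (by omega), pvCarry_snd_false]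
        simp

-- ===== VERDICT (by name: the statement is the Claim_ definition above) =====
theorem push_button_spec : Claim_equal_push_button := by
  intro arr1 arr2 N _ hpre
  unfold Spec_push_button push_button push_button_alt
  by_cases hN : 2 ≤ N
  · have h1 : N ≤ (arr1.length : Int) := by
      rcases hpre with h | ⟨h, _⟩
      · omega
      · exact h
    obtain ⟨hc, hlen, ha, hf1⟩ := pv_loop_inv arr1 arr2 N hN h1 (N - 1).toNat le_rfl
    rcases hsb : (List.range (N - 1).toNat).foldl (pvStepB arr1 arr2 N)
        (0, false, false, []) with ⟨c, f0, f1, out⟩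
    rw [hsb] at hc hlen ha hf1
    have hf1' : f1 = false := hf1 rfl
    subst hf1'
    have hm : (N - 1).toNat < arr1.length := by omega
    have hdrop : arr1.drop (N - 1).toNat =
        arr1.getD (N - 1).toNat 0 :: arr1.drop ((N - 1).toNat + 1) :=
      pv_drop_cons arr1 (N - 1).toNat hm
    have hout : (List.range' 1 (N - 1).toNat).foldl (pvStepA arr2 N) (arr1, 0)
        = ((out ++ [if f0 then 1 - arr1.getD (N - 1).toNat 0
                    else arr1.getD (N - 1).toNat 0]) ++
            arr1.drop ((N - 1).toNat + 1), c) := by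
      rw [Prod.ext_iff]
      refine ⟨?_, hc⟩
      rw [ha, hdrop, pvCarry_snd_false]
      simp
    rw [hout]
    simp only [if_pos hN]
    have hlen1 : (out ++ [if f0 then 1 - arr1.getD (N - 1).toNat 0
        else arr1.getD (N - 1).toNat 0]).length = (N - 1).toNat + 1 := by
      simp [hlen]
    rw [hlen1]
  · have hz : (N - 1).toNat = 0 := by omega
    simp [hz, List.range'_zero, List.range_zero, if_neg hN]
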